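-- pv_equiv track=rewrite | github.com/exciteproject/Exparser | EXparser/src/spc_fun_seg.py | flname_rect
-- ===== SOURCE A (Python) =====
-- def flname_rect(label):
-- 	if (('FN' in label)&('LN' in label)):
-- 		tmp1=label.index('FN')
-- 		tmp2=label.index('LN')
-- 		if tmp1<tmp2:
-- 			in1 = [i for i, x in enumerate(label) if x == "FN"]
-- 			in2 = [i for i, x in enumerate(label) if x == "LN"]
-- 			for x in in1:
-- 				label[x]='LN'
-- 			for x in in2:
-- 				label[x]='FN'
-- 	elif ('FN' in label):
-- 		in1 = [i for i, x in enumerate(label) if x == "FN"]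
-- 		for x in in1:
-- 			label[x]='LN'
-- 	return label
-- ===== SOURCE B (Python) =====
-- def flname_rect(label):
--     # The swap is needed exactly when the first 'FN'-or-'LN' element is 'FN':
--     # A's swap branch fires when FN precedes LN, and its FN-only branch (no LN
--     # present) is the same uniform swap since there is no 'LN' to rename.
--     first = next((x for x in label if x == 'FN' or x == 'LN'), None)
--     if first == 'FN':
--         label[:] = ['LN' if x == 'FN' else 'FN' if x == 'LN' else x for x in label]
--     return label
-- ===== Notes on version B (the rewrite author's own statement) =====
-- stated objective: simpler
-- what changed: Replaces A's three-way branch (two memberships, two index lookups and a comparison, then gather-index-lists-and-scatter writes, with a separate FN-only branch) by one observation: the relabelling is exactly the uniform FN<->LN swap, applied iff the first FN-or-LN element of the list is FN; B finds that first element with one short-circuit scan and does one swap pass.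
import Mathlib
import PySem

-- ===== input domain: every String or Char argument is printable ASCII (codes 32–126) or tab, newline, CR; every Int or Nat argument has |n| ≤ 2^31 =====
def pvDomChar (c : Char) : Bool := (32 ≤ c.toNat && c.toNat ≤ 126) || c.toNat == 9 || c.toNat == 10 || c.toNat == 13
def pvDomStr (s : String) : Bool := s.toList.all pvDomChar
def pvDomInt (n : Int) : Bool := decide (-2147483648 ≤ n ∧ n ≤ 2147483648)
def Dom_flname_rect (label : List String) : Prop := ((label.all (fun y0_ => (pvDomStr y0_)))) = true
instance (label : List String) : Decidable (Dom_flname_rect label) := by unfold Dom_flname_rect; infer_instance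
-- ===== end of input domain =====

-- B replaces A's three branches (membership tests, first-index comparison, gather-index-lists
-- and scatter writes) by one scan for the first "FN"-or-"LN" element and, if it is "FN", one
-- uniform FN<->LN swap pass (return-value equivalence; both Pythons mutate the argument alike).

-- ===== PORT A =====
def flname_rect (label : List String) : List String :=
  if ("FN" ∈ label) ∧ ("LN" ∈ label) then
    let tmp1 := (PySem.List.index? label "FN").getD 0
    let tmp2 := (PySem.List.index? label "LN").getD 0
    if tmp1 < tmp2 then
      let in1 := ((PySem.List.enumerate label).filter (fun p => p.2 == "FN")).map (·.1)
      let in2 := ((PySem.List.enumerate label).filter (fun p => p.2 == "LN")).map (·.1)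
      let label1 := in1.foldl (fun l x => PySem.List.pySetD l x "LN") label
      let label2 := in2.foldl (fun l x => PySem.List.pySetD l x "FN") label1
      label2
    else label
  else if "FN" ∈ label then
    let in1 := ((PySem.List.enumerate label).filter (fun p => p.2 == "FN")).map (·.1)
    in1.foldl (fun l x => PySem.List.pySetD l x "LN") label
  else label

-- ===== PORT B =====
def flname_rect_alt (label : List String) : List String :=
  let first := label.find? (fun x => x == "FN" || x == "LN")
  if first = some "FN" then
    label.map (fun x => if x == "FN" then "LN" else if x == "LN" then "FN" else x)
  else label

-- ===== PRECONDITION & SPEC =====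
def Spec_flname_rect (label : List String) (out : List String) : Prop := out = flname_rect_alt label
instance (label : List String) (out : List String) : Decidable (Spec_flname_rect label out) := by unfold Spec_flname_rect; infer_instance

-- ===== CLAIM =====
def Claim_equal_flname_rect : Prop := ∀ (label : List String), Dom_flname_rect label → Spec_flname_rect label (flname_rect label)

-- ===== LEMMAS AND PROOFS =====

-- B's condition, characterised by A's data: the first FN-or-LN element is "FN" iff
-- "FN" occurs and, if "LN" also occurs, the first "FN" comes before the first "LN".
theorem find?_fn_iff (l : List String) :
    (l.find? (fun x => x == "FN" || x == "LN") = some "FN") ↔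
      ("FN" ∈ l ∧ ("LN" ∈ l →
        (PySem.List.index? l "FN").getD 0 < (PySem.List.index? l "LN").getD 0)) := by
  induction l with
  | nil => simp
  | cons a l ih =>
    by_cases hfn : a = "FN"
    · subst hfn
      have hfind : List.find? (fun x => x == "FN" || x == "LN") ("FN" :: l) = some "FN" :=
        List.find?_cons_of_pos (p := fun x => x == "FN" || x == "LN") (by decide)
      simp only [hfind, true_iff]
      refine ⟨List.mem_cons_self, fun hln => ?_⟩
      have hln' : "LN" ∈ l := by
        rcases List.mem_cons.1 hln with h | h
        · exact absurd h.symm (by decide)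
        · exact h
      obtain ⟨k, hk⟩ := Option.isSome_iff_exists.1 ((PySem.List.index?_isSome_iff l "LN").2 hln')
      have hne : ("FN" : String) ≠ "LN" := by decide
      rw [PySem.List.index?_cons_self, PySem.List.index?_cons_of_ne l hne, hk]
      simp
    · by_cases hln : a = "LN"
      · subst hln
        have hfind : List.find? (fun x => x == "FN" || x == "LN") ("LN" :: l) = some "LN" :=
          List.find?_cons_of_pos (p := fun x => x == "FN" || x == "LN") (by decide)
        simp only [hfind, Option.some.injEq]
        constructor
        · intro h; exact absurd h (by decide)
        · rintro ⟨hm, hc⟩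
          have hm' : "FN" ∈ l := by
            rcases List.mem_cons.1 hm with h | h
            · exact absurd h.symm (by decide)
            · exact h
          obtain ⟨k, hk⟩ := Option.isSome_iff_exists.1 ((PySem.List.index?_isSome_iff l "FN").2 hm')
          have := hc List.mem_cons_self
          have hne : ("LN" : String) ≠ "FN" := by decide
          rw [PySem.List.index?_cons_self, PySem.List.index?_cons_of_ne l hne, hk] at this
          simp at this
      · have hp : ¬ ((fun x => x == "FN" || x == "LN") a = true) := by
          simp [hfn, hln]
        rw [List.find?_cons_of_neg (p := fun x => x == "FN" || x == "LN") hp, ih]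
        have hmf : ("FN" ∈ a :: l) ↔ ("FN" ∈ l) := by
          simp only [List.mem_cons]
          exact ⟨fun h => h.resolve_left (fun h' => hfn h'.symm), Or.inr⟩
        have hml : ("LN" ∈ a :: l) ↔ ("LN" ∈ l) := by
          simp only [List.mem_cons]
          exact ⟨fun h => h.resolve_left (fun h' => hln h'.symm), Or.inr⟩
        rw [hmf, hml]
        constructor
        · rintro ⟨hm, hc⟩
          refine ⟨hm, fun hl => ?_⟩
          obtain ⟨k1, hk1⟩ := Option.isSome_iff_exists.1 ((PySem.List.index?_isSome_iff l "FN").2 hm)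
          obtain ⟨k2, hk2⟩ := Option.isSome_iff_exists.1 ((PySem.List.index?_isSome_iff l "LN").2 hl)
          have := hc hl
          rw [hk1, hk2] at this
          rw [PySem.List.index?_cons_of_ne (v := "FN") l hfn,
              PySem.List.index?_cons_of_ne (v := "LN") l hln, hk1, hk2]
          simpa using this
        · rintro ⟨hm, hc⟩
          refine ⟨hm, fun hl => ?_⟩
          obtain ⟨k1, hk1⟩ := Option.isSome_iff_exists.1 ((PySem.List.index?_isSome_iff l "FN").2 hm)
          obtain ⟨k2, hk2⟩ := Option.isSome_iff_exists.1 ((PySem.List.index?_isSome_iff l "LN").2 hl)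
          have := hc hl
          rw [PySem.List.index?_cons_of_ne (v := "FN") l hfn,
              PySem.List.index?_cons_of_ne (v := "LN") l hln, hk1, hk2] at this
          rw [hk1, hk2]
          simpa using this

-- The index list A builds: j ∈ it ↔ label[j] = t (for natural j).
theorem mem_idxs_iff (l : List String) (t : String) (j : Nat) :
    ((j : Int) ∈ ((PySem.List.enumerate l).filter (fun p => p.2 == t)).map (·.1)) ↔
      l[j]? = some t := by
  simp only [List.mem_map, List.mem_filter, PySem.List.mem_enumerate_iff]
  constructor
  · rintro ⟨p, ⟨⟨k, hk, rfl⟩, ht⟩, h1⟩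
    simp only [beq_iff_eq] at ht
    simp only [zero_add] at h1
    have hkj : k = j := by exact_mod_cast h1
    subst hkj
    simp [List.getElem?_eq_getElem hk, ht]
  · intro h
    have hj : j < l.length := by
      by_contra hc
      have hnone : l[j]? = none := List.getElem?_eq_none (by omega)
      rw [hnone] at h; simp at h
    refine ⟨(j, l[j]), ⟨⟨j, hj, by simp⟩, ?_⟩, by simp⟩
    rw [List.getElem?_eq_getElem hj] at h
    simp only [Option.some.injEq] at h
    simp [h]

theorem foldl_pySetD_getElem? (idxs : List Int) (l : List String) (v : String) (j : Nat)
    (hnn : ∀ i ∈ idxs, 0 ≤ i) :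
    (idxs.foldl (fun l x => PySem.List.pySetD l x v) l)[j]? =
      if (j : Int) ∈ idxs then (if j < l.length then some v else none) else l[j]? := by
  induction idxs generalizing l with
  | nil => simp
  | cons i rest ih =>
    have hi : 0 ≤ i := hnn i (by simp)
    have hrest : ∀ x ∈ rest, 0 ≤ x := fun x hx => hnn x (by simp [hx])
    simp only [List.foldl_cons]
    rw [ih _ hrest]
    rw [PySem.List.pySetD_of_nonneg _ _ hi]
    simp only [List.length_set, List.getElem?_set, List.mem_cons]
    by_cases hj : (j : Int) ∈ rest
    · simp [hj]
    · by_cases hij : (j : Int) = i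
      · have ht : i.toNat = j := by omega
        simp [hij, ht]
      · have ht : ¬ i.toNat = j := by omega
        simp [hij, ht]

theorem idxs_nonneg (l : List String) (t : String) :
    ∀ i ∈ ((PySem.List.enumerate l).filter (fun p => p.2 == t)).map (·.1), 0 ≤ i := by
  intro i hi
  simp only [List.mem_map, List.mem_filter, PySem.List.mem_enumerate_iff] at hi
  obtain ⟨⟨a, b⟩, ⟨⟨k, hk, hp⟩, _⟩, h1⟩ := hi
  cases hp; simp at h1 ⊢; omega

-- Result of A's two scatter loops at position j equals B's swap pass.
theorem swap_branch_getElem? (l : List String) (j : Nat) :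
    ((((PySem.List.enumerate l).filter (fun p => p.2 == "LN")).map (·.1)).foldl
        (fun l' x => PySem.List.pySetD l' x "FN")
        ((((PySem.List.enumerate l).filter (fun p => p.2 == "FN")).map (·.1)).foldl
          (fun l' x => PySem.List.pySetD l' x "LN") l))[j]? =
      (l.map (fun x => if x == "FN" then "LN" else if x == "LN" then "FN" else x))[j]? := by
  rw [foldl_pySetD_getElem? _ _ _ _ (idxs_nonneg l "LN"),
      foldl_pySetD_getElem? _ _ _ _ (idxs_nonneg l "FN")]
  have hlen : ((((PySem.List.enumerate l).filter (fun p => p.2 == "FN")).map (·.1)).foldl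
      (fun l' x => PySem.List.pySetD l' x "LN") l).length = l.length := by
    induction ((((PySem.List.enumerate l).filter (fun p => p.2 == "FN")).map (·.1))) generalizing l with
    | nil => rfl
    | cons i rest ih => simp [List.foldl_cons, ih, PySem.List.length_pySetD]
  rw [hlen]
  simp only [mem_idxs_iff]
  rw [List.getElem?_map]
  by_cases hj : j < l.length
  · rw [List.getElem?_eq_getElem hj]
    by_cases h1 : l[j] = "LN"
    · simp [h1, hj]
    · by_cases h2 : l[j] = "FN"
      · simp [h2, hj]
      · simp [h1, h2]
  · have : l[j]? = none := List.getElem?_eq_none (by omega)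
    simp [hj]

-- With no "LN" present, A's FN-only scatter loop equals B's swap pass too.
theorem fn_branch_getElem? (l : List String) (hln : "LN" ∉ l) (j : Nat) :
    ((((PySem.List.enumerate l).filter (fun p => p.2 == "FN")).map (·.1)).foldl
        (fun l' x => PySem.List.pySetD l' x "LN") l)[j]? =
      (l.map (fun x => if x == "FN" then "LN" else if x == "LN" then "FN" else x))[j]? := by
  rw [foldl_pySetD_getElem? _ _ _ _ (idxs_nonneg l "FN")]
  simp only [mem_idxs_iff]
  rw [List.getElem?_map]
  by_cases hj : j < l.length
  · rw [List.getElem?_eq_getElem hj]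
    have h1 : l[j] ≠ "LN" := fun h => hln (h ▸ List.getElem_mem hj)
    by_cases h2 : l[j] = "FN"
    · simp [h2, hj]
    · simp [h1, h2]
  · have : l[j]? = none := List.getElem?_eq_none (by omega)
    simp [hj]

-- ===== VERDICT =====
theorem flname_rect_spec : Claim_equal_flname_rect := by
  intro label _
  unfold Spec_flname_rect flname_rect flname_rect_alt
  simp only []
  by_cases hB : label.find? (fun x => x == "FN" || x == "LN") = some "FN"
  · rw [if_pos hB]
    obtain ⟨hfn, hc⟩ := (find?_fn_iff label).1 hB
    by_cases hln : "LN" ∈ label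
    · rw [if_pos ⟨hfn, hln⟩, if_pos (hc hln)]
      exact List.ext_getElem? (swap_branch_getElem? label)
    · rw [if_neg (by tauto), if_pos hfn]
      exact List.ext_getElem? (fn_branch_getElem? label hln)
  · rw [if_neg hB]
    rw [find?_fn_iff] at hB
    push Not at hB
    by_cases hfn : "FN" ∈ label
    · obtain ⟨hln, hge⟩ := hB hfn
      rw [if_pos ⟨hfn, hln⟩, if_neg (by omega)]
    · rw [if_neg (by tauto), if_neg hfn]
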